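-- pv_equiv track=rewrite | github.com/tbafna/PythonScripts | Analysis_Expt_201901/Functions.py | nearestTimePoint
-- ===== SOURCE A (Python) =====
-- def nearestTimePoint(dates, date):
--
--     for d in dates:
--         if d <= date:
--             nearestTP = d
--         else:
--             continue
--     try:
--         nearestTP
--         nearestTPind = dates.index(nearestTP)
--     except:
--         nearestTP = 0
--         nearestTPind = -1
--
--     return nearestTP, nearestTPind
-- ===== SOURCE B (Python) =====
-- def nearestTimePoint(dates, date):
--     # Scan from the back: the first qualifying element found is the last one
--     # the forward scan would keep; stop early instead of visiting the rest.
--     for d in reversed(dates):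
--         if d <= date:
--             return d, dates.index(d)
--     return 0, -1
-- ===== Notes on version B (the rewrite author's own statement) =====
-- stated objective: simpler
-- what changed: A scans the whole list forward keeping the last element <= date in a variable and uses a try/except NameError to detect 'none found'; B scans backwards and returns at the first element <= date (early exit), with a plain fallback for the empty case.
import Mathlib
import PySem

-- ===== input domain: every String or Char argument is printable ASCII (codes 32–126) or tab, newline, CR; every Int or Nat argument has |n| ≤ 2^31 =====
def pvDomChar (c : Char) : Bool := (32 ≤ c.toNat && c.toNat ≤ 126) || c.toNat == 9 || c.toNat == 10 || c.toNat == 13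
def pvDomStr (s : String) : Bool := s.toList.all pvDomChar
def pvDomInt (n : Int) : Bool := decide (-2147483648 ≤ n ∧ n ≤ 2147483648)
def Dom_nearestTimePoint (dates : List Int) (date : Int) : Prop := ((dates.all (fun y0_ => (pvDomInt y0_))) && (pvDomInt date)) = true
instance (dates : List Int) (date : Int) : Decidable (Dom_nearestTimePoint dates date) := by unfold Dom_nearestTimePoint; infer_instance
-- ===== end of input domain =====

-- B replaces A's forward scan + try/except-NameError by a backward scan that
-- returns at the first element ≤ date (objective: simpler, early exit).

-- ===== PORT A =====
-- A's loop: nearestTP is unbound initially; each d ≤ date rebinds it.  Ported as Option Int.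
-- The try/except: if nearestTP is unbound (none) → (0, -1); else index of first occurrence
-- (always found, since the value comes from the list).
def nearestTimePoint (dates : List Int) (date : Int) : List Int :=
  match dates.foldl (fun st d => if d ≤ date then some d else st) none with
  | none => [0, -1]
  | some v => [v, (((PySem.List.index? dates v).getD 0 : Nat) : Int)]

-- ===== PORT B =====
def nearestTimePointAltGo (dates : List Int) (date : Int) : List Int → List Int
  | [] => [0, -1]
  | d :: rest =>
      if d ≤ date then [d, (((PySem.List.index? dates d).getD 0 : Nat) : Int)]
      else nearestTimePointAltGo dates date rest

def nearestTimePoint_alt (dates : List Int) (date : Int) : List Int :=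
  nearestTimePointAltGo dates date dates.reverse

-- ===== PRECONDITION & SPEC =====
def Spec_nearestTimePoint (dates : List Int) (date : Int) (out : List Int) : Prop := out = nearestTimePoint_alt dates date
instance (dates : List Int) (date : Int) (out : List Int) : Decidable (Spec_nearestTimePoint dates date out) := by unfold Spec_nearestTimePoint; infer_instance

-- ===== CLAIM (what is proved, stated in full; the proofs are below) =====
def Claim_equal_nearestTimePoint : Prop := ∀ (dates : List Int) (date : Int), Dom_nearestTimePoint dates date → Spec_nearestTimePoint dates date (nearestTimePoint dates date)

-- ===== LEMMAS AND PROOFS =====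

-- A's fold keeps the LAST element ≤ date, i.e. the first match of the reversed list.
theorem foldl_keep_last (date : Int) :
    ∀ (l : List Int) (init : Option Int),
      l.foldl (fun st d => if d ≤ date then some d else st) init
        = ((l.reverse.find? (fun d => d ≤ date)).elim init some) := by
  intro l
  induction l with
  | nil => intro init; simp
  | cons a l ih =>
      intro init
      simp only [List.foldl_cons, List.reverse_cons, List.find?_append]
      rw [ih]
      by_cases hle : a ≤ date <;>
        cases h : l.reverse.find? (fun d => d ≤ date) <;> simp [List.find?, hle]

-- B's helper computes exactly that match of the reversed list.
theorem altGo_eq_find (dates : List Int) (date : Int) :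
    ∀ (l : List Int),
      nearestTimePointAltGo dates date l
        = ((l.find? (fun d => d ≤ date)).elim [0, -1]
            (fun v => [v, (((PySem.List.index? dates v).getD 0 : Nat) : Int)])) := by
  intro l
  induction l with
  | nil => simp [nearestTimePointAltGo]
  | cons a l ih =>
      simp only [nearestTimePointAltGo, List.find?]
      split
      · next h => simp [h]
      · next h =>
        rw [ih]
        have : (fun d => decide (d ≤ date)) a = false := by simp [h]
        simp [this]

-- ===== VERDICT (by name: the statement is the Claim_ definition above) =====
theorem nearestTimePoint_spec : Claim_equal_nearestTimePoint := by
  intro dates date _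
  unfold Spec_nearestTimePoint nearestTimePoint nearestTimePoint_alt
  rw [foldl_keep_last, altGo_eq_find]
  cases h : dates.reverse.find? (fun d => d ≤ date) <;> simp
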